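-- pv_equiv track=rewrite | github.com/PiyuGandhi/InterviewPractice | InterViewBit/maxNonNegativeSubarray.py | maxNonNegative
-- ===== SOURCE A (Python) =====
-- def maxNonNegative(A):
--     ans = []
--     for i in range(0,len(A)):
--
--         currArr = []
--         if A[i] >= 0:
--             while  i < len(A) and A[i] >= 0 :
--                 currArr.append(A[i])
--                 i += 1
--         if sum(currArr) > sum(ans):
--             ans = currArr
--         elif sum(currArr) == sum(ans):
--             if len(ans) < len(currArr):
--                 ans = currArr
--     return ans
-- ===== SOURCE B (Python) =====
-- def maxNonNegative(A):
--     best = []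
--     best_sum = 0
--     i = 0
--     n = len(A)
--     while i < n:
--         if A[i] < 0:
--             i += 1
--             continue
--         j = i
--         s = 0
--         while j < n and A[j] >= 0:
--             s += A[j]
--             j += 1
--         if s > best_sum or (s == best_sum and len(best) < j - i):
--             best = A[i:j]
--             best_sum = s
--         i = j
--     return best
-- ===== Notes on version B (the rewrite author's own statement) =====
-- stated objective: faster
-- what changed: B makes one linear pass over the maximal non-negative runs (jumping past each run), tracking the best (sum, length) run, instead of A's rebuilding and re-summing a run suffix for every index.
import Mathlib
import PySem

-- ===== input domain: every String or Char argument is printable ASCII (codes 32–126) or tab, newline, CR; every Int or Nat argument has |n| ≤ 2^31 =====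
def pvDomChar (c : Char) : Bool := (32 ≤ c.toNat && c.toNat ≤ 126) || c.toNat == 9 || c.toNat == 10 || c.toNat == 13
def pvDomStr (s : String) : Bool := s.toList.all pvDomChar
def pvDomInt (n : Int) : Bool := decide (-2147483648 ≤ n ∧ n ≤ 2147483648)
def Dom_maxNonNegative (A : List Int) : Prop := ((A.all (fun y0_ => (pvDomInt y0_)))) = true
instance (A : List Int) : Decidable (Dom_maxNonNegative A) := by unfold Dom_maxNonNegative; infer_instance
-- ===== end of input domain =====

-- B replaces A's per-index suffix rebuild (quadratic) by one linear pass over the maximal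
-- non-negative runs, tracking the best (sum, length) run; return values proved equal.

-- ===== PORT A =====
-- the inner `while i < len(A) and A[i] >= 0: currArr.append(A[i]); i += 1`,
-- applied to the tail of A starting at index i (modelled as A.drop i)
def aWhile : List Int → List Int
  | [] => []
  | x :: xs => if 0 ≤ x then x :: aWhile xs else []

-- one iteration of A's `for i in range(0, len(A))` body, with `ans` the accumulator
def aStep (L : List Int) (ans : List Int) (i : Nat) : List Int :=
  let currArr := if 0 ≤ L.getD i 0 then aWhile (L.drop i) else []
  if currArr.sum > ans.sum then currArr
  else if currArr.sum = ans.sum then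
    (if ans.length < currArr.length then currArr else ans)
  else ans

def maxNonNegative (A : List Int) : List Int :=
  (List.range A.length).foldl (aStep A) []

-- ===== PORT B =====
-- Source B's outer while loop: skip a negative element, or consume a whole maximal
-- non-negative run (the inner while = takeWhile/dropWhile, s = its sum), keeping
-- the best run seen so far together with its cached sum `s`
def bGo : List Int → List Int → Int → List Int
  | [], best, _ => best
  | x :: xs, best, s =>
    if x < 0 then bGo xs best s
    else
      let run := x :: xs.takeWhile (fun y => decide (0 ≤ y))
      let rs := run.sum
      if rs > s ∨ (rs = s ∧ best.length < run.length) then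
        bGo (xs.dropWhile (fun y => decide (0 ≤ y))) run rs
      else
        bGo (xs.dropWhile (fun y => decide (0 ≤ y))) best s
termination_by l _ _ => l.length
decreasing_by
  all_goals
    (try have := List.length_dropWhile_le (fun y => decide ((0:Int) ≤ y)) xs)
    <;> simp only [List.length_cons] <;> omega

def maxNonNegative_alt (A : List Int) : List Int := bGo A [] 0

-- ===== PRECONDITION & SPEC =====
def Spec_maxNonNegative (A : List Int) (out : List Int) : Prop := out = maxNonNegative_alt A
instance (A : List Int) (out : List Int) : Decidable (Spec_maxNonNegative A out) := by unfold Spec_maxNonNegative; infer_instance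

-- ===== CLAIM (what is proved, stated in full; the proofs are below) =====
def Claim_equal_maxNonNegative : Prop := ∀ (A : List Int), Dom_maxNonNegative A → Spec_maxNonNegative A (maxNonNegative A)

-- ===== LEMMAS AND PROOFS =====

theorem aWhile_eq_takeWhile (l : List Int) :
    aWhile l = l.takeWhile (fun y => decide (0 ≤ y)) := by
  induction l with
  | nil => rfl
  | cons x xs ih => by_cases h : (0:Int) ≤ x <;> simp [aWhile, List.takeWhile_cons, h, ih]

theorem sum_drop_le (l : List Int) (i : Nat) (h : ∀ y ∈ l, 0 ≤ y) :
    (l.drop i).sum ≤ l.sum := by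
  have := List.take_append_drop i l
  have h1 : (0:Int) ≤ (l.take i).sum :=
    List.sum_nonneg (fun y hy => h y (List.mem_of_mem_take hy))
  calc (l.drop i).sum ≤ (l.take i).sum + (l.drop i).sum := by omega
    _ = l.sum := by rw [← List.sum_append, this]

theorem tw_drop {α : Type} (p : α → Bool) (l : List α) (i : Nat)
    (h : i ≤ (l.takeWhile p).length) :
    (l.drop i).takeWhile p = (l.takeWhile p).drop i := by
  induction l generalizing i with
  | nil => simp
  | cons x xs ih =>
    by_cases hp : p x
    · cases i with
      | zero => simp
      | succ j =>
        simp only [List.takeWhile_cons, hp, if_pos] at h ⊢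
        simp only [List.drop_succ_cons, List.length_cons] at h ⊢
        exact ih j (by omega)
    · have hi0 : i = 0 := by
        rw [List.takeWhile_cons, if_neg hp] at h
        simpa using h
      subst hi0; simp

theorem aStep_shift (L : List Int) (m i : Nat) (a : List Int) :
    aStep L a (m + i) = aStep (L.drop m) a i := by
  have h1 : L.getD (m + i) 0 = (L.drop m).getD i 0 := by
    simp [List.getD_eq_getElem?_getD, List.getElem?_drop]
  have h2 : L.drop (m + i) = (L.drop m).drop i := by
    rw [List.drop_drop, Nat.add_comm]
  simp only [aStep]
  rw [h1, h2]

theorem foldl_id {α β : Type} (f : β → α → β) (b : β) (l : List α)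
    (h : ∀ i ∈ l, f b i = b) : l.foldl f b = b := by
  induction l with
  | nil => rfl
  | cons x xs ih => simp only [List.foldl_cons, h x (by simp)]; exact ih (fun i hi => h i (by simp [hi]))

-- a candidate that is dominated (smaller-or-equal sum; on equal sum, no greater length)
-- leaves the accumulator unchanged
theorem keep_of_dominated (c b : List Int) (hsum : c.sum ≤ b.sum)
    (hlen : c.sum = b.sum → c.length ≤ b.length) :
    (if c.sum > b.sum then c
     else if c.sum = b.sum then (if b.length < c.length then c else b) else b) = b := by
  split_ifs with h1 h2 h3
  · omega
  · exact absurd (hlen h2) (by omega)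
  · rfl
  · rfl

-- A's nested-if update is the single-condition update B uses
theorem cond_eq (c b : List Int) :
    (if c.sum > b.sum then c
     else if c.sum = b.sum then (if b.length < c.length then c else b) else b)
    = (if c.sum > b.sum ∨ (c.sum = b.sum ∧ b.length < c.length) then c else b) := by
  split_ifs <;> first | rfl | omega

-- the main invariant: A's fold over the remaining indices equals B's run scan,
-- provided the cached sum is the accumulator's sum and that sum is non-negative
theorem main_lemma (n : Nat) :
    ∀ (L best : List Int), L.length ≤ n → 0 ≤ best.sum →
      (List.range L.length).foldl (aStep L) best = bGo L best best.sum := by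
  induction n with
  | zero =>
    intro L best hL _
    have : L = [] := List.eq_nil_of_length_eq_zero (by omega)
    subst this; simp [bGo]
  | succ n ih =>
    intro L best hL hb
    match L with
    | [] => simp [bGo]
    | x :: xs =>
      simp only [List.length_cons, List.range_succ_eq_map, List.foldl_cons, List.foldl_map]
      have hshift : (fun (a : List Int) (i : Nat) => aStep (x :: xs) a i.succ) = aStep xs := by
        funext a i
        have : i.succ = 1 + i := by omega
        rw [this, aStep_shift]; rfl
      rw [hshift]
      by_cases hx : (0:Int) ≤ x
      · -- head of a non-negative run
        set p : Int → Bool := fun y => decide (0 ≤ y) with hp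
        set tw := xs.takeWhile p with htw
        set dw := xs.dropWhile p with hdw
        have hxs : tw ++ dw = xs := List.takeWhile_append_dropWhile
        have htwmem : ∀ y ∈ tw, (0:Int) ≤ y := by
          intro y hy
          have := List.mem_takeWhile_imp hy
          simpa [hp] using this
        set run : List Int := x :: tw with hrun
        have hrunmem : ∀ y ∈ run, (0:Int) ≤ y := by
          intro y hy
          rcases List.mem_cons.mp hy with h | h
          · subst h; exact hx
          · exact htwmem y h
        -- first index: ans becomes best'
        have hstep0 : aStep (x :: xs) best 0 =
            (if run.sum > best.sum ∨ (run.sum = best.sum ∧ best.length < run.length)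
             then run else best) := by
          have hcurr : (if 0 ≤ (x :: xs).getD 0 0 then aWhile ((x :: xs).drop 0) else [])
              = run := by
            simp [hx, aWhile, aWhile_eq_takeWhile, hrun, htw, hp]
          simp only [aStep]
          rw [hcurr, cond_eq]
        rw [hstep0]
        set best' := (if run.sum > best.sum ∨ (run.sum = best.sum ∧ best.length < run.length)
             then run else best) with hbest'
        -- split the remaining indices: inside the run, then after the run
        have hlenxs : xs.length = tw.length + dw.length := by
          rw [← hxs]; simp
        rw [hlenxs, List.range_add, List.foldl_append, List.foldl_map]
        -- inside the run nothing changes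
        have hkeep : ∀ i ∈ List.range tw.length, aStep xs best' i = best' := by
          intro i hi
          have hi' : i < tw.length := List.mem_range.mp hi
          have hgd : xs.getD i 0 = tw.getD i 0 := by
            rw [← hxs]
            simp [List.getD_eq_getElem?_getD, List.getElem?_append_left hi']
          have hnn : (0:Int) ≤ xs.getD i 0 := by
            rw [hgd, List.getD_eq_getElem?_getD, List.getElem?_eq_getElem hi']
            exact htwmem _ (List.getElem_mem hi')
          have hcurr : (if 0 ≤ xs.getD i 0 then aWhile (xs.drop i) else []) = tw.drop i := by
            rw [if_pos hnn, aWhile_eq_takeWhile, tw_drop p xs i (le_of_lt hi')]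
          have hcs : (tw.drop i).sum ≤ tw.sum := sum_drop_le tw i htwmem
          have hrs : tw.sum ≤ run.sum := by simp [hrun]; omega
          have hcl : (tw.drop i).length < run.length := by
            simp only [hrun, List.length_cons, List.length_drop]; omega
          have hdom : (tw.drop i).sum ≤ best'.sum ∧
              ((tw.drop i).sum = best'.sum → (tw.drop i).length ≤ best'.length) := by
            rw [hbest']
            split_ifs with hc
            · exact ⟨by omega, fun _ => by omega⟩
            · push_neg at hc
              refine ⟨by omega, fun hsum => ?_⟩
              have h2 : run.sum = best.sum := by omega
              have := hc.2 h2
              omega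
          simp only [aStep]
          rw [hcurr]
          exact keep_of_dominated _ _ hdom.1 hdom.2
        rw [foldl_id _ _ _ hkeep]
        -- after the run: shift to dw and use the IH
        have hshift2 : (fun (a : List Int) (i : Nat) => aStep xs a (tw.length + i)) = aStep dw := by
          funext a i
          rw [aStep_shift]
          congr 1
          rw [← hxs, List.drop_left]
        rw [hshift2]
        have hb' : 0 ≤ best'.sum := by
          rw [hbest']
          split_ifs
          · exact List.sum_nonneg hrunmem
          · exact hb
        have hdwlen : dw.length ≤ n := by
          have := List.length_dropWhile_le p xs
          simp only [List.length_cons] at hL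
          omega
        rw [ih dw best' hdwlen hb']
        -- match B's step
        rw [show bGo (x :: xs) best best.sum =
            (if run.sum > best.sum ∨ (run.sum = best.sum ∧ best.length < run.length)
             then bGo dw run run.sum else bGo dw best best.sum) from by
          simp only [bGo]
          rw [if_neg (by omega : ¬ x < 0)]]
        rw [hbest']
        split_ifs <;> rfl
      · -- negative head: index 0 leaves the accumulator unchanged, recurse on the tail
        have hstep0 : aStep (x :: xs) best 0 = best := by
          have hc0 : (if 0 ≤ (x :: xs).getD 0 0 then aWhile ((x :: xs).drop 0) else [])
              = ([] : List Int) := by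
            rw [show (x :: xs).getD 0 0 = x from rfl, if_neg hx]
          simp only [aStep]
          rw [hc0]
          exact keep_of_dominated [] best (by simpa using hb) (fun _ => by simp)
        rw [hstep0]
        have hxs : xs.length ≤ n := by simp at hL; omega
        rw [ih xs best hxs hb]
        simp only [bGo]
        rw [if_pos (by omega : x < 0)]

-- ===== VERDICT (by name: the statement is the Claim_ definition above) =====
theorem maxNonNegative_spec : Claim_equal_maxNonNegative := by
  intro A _
  show maxNonNegative A = maxNonNegative_alt A
  have := main_lemma A.length A [] le_rfl (by simp)
  simpa [maxNonNegative, maxNonNegative_alt] using this
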